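-- pv_equiv track=rewrite | github.com/nlgilbert/advent_of_code_2021 | day23/main.py | get_wrong_letter_coords_in_room
-- ===== SOURCE A (Python) =====
-- def get_wrong_letter_coords_in_room(burrow, col, desired_letter):
--     wrong_coords = []
--     wrong_below = False
--     for row in range(len(burrow) - 2, 1, -1):
--         letter = burrow[row][col]
--         if letter != desired_letter or wrong_below:
--             wrong_below = True
--             if letter in 'ABCD':
--                 wrong_coords.append(((row, col), letter))
--     return wrong_coords
-- ===== SOURCE B (Python) =====
-- def get_wrong_letter_coords_in_room(burrow, col, desired_letter):
--     threshold = max((row for row in range(2, len(burrow) - 1)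
--                      if burrow[row][col] != desired_letter), default=1)
--     return [((row, col), burrow[row][col])
--             for row in range(threshold, 1, -1)
--             if burrow[row][col] in 'ABCD']
-- ===== Notes on version B (the rewrite author's own statement) =====
-- stated objective: alternative
-- what changed: Replaces A's single descending scan with a sticky wrong_below flag by a two-phase computation: first find the deepest row whose letter differs from the desired one (a max over a filtered range, default 1), then collect the amphipod letters in a comprehension over the rows from that boundary down to row 2.
import Mathlib
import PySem

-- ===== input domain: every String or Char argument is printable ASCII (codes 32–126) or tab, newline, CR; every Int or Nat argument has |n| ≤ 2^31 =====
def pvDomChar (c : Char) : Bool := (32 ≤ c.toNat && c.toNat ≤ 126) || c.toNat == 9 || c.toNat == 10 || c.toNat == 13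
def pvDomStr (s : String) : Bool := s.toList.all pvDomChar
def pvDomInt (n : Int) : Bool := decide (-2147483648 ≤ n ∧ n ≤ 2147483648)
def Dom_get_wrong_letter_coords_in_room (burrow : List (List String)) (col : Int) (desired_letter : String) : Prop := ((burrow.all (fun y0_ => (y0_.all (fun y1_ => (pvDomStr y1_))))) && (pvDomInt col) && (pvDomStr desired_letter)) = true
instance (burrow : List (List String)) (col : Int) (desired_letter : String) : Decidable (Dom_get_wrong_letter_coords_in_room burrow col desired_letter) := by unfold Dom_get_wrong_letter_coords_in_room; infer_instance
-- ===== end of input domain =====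

-- B replaces A's single sticky-flag scan by an explicit boundary search (max wrong row) followed by a
-- comprehension over the rows below it; objective: alternative decomposition, same O(n) cost.

-- ===== PORT A =====
def get_wrong_letter_coords_in_room (burrow : List (List String)) (col : Int) (desired_letter : String) : List ((Int × Int) × String) :=
  ((PySem.List.pyRange ((burrow.length : Int) - 2) 1 (-1)).foldl
    (fun (st : List ((Int × Int) × String) × Bool) row =>
      let letter := PySem.List.pyGetD (PySem.List.pyGetD burrow row []) col ""
      if letter != desired_letter || st.2 then
        (if PySem.Str.isIn letter "ABCD" then st.1 ++ [((row, col), letter)] else st.1, true)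
      else st)
    ([], false)).1

-- ===== PORT B =====
def get_wrong_letter_coords_in_room_alt (burrow : List (List String)) (col : Int) (desired_letter : String) : List ((Int × Int) × String) :=
  let letterAt := fun (row : Int) => PySem.List.pyGetD (PySem.List.pyGetD burrow row []) col ""
  let threshold := PySem.List.maxD
    ((PySem.List.pyRange 2 ((burrow.length : Int) - 1) 1).filter (fun row => letterAt row != desired_letter))
    (fun x => x) 1
  ((PySem.List.pyRange threshold 1 (-1)).filter (fun row => PySem.Str.isIn (letterAt row) "ABCD")).map
    (fun row => ((row, col), letterAt row))

-- ===== PRECONDITION & SPEC =====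
-- Pre_ excludes exactly the inputs where Python's burrow[row][col] raises IndexError: some scanned
-- row's list does not admit index col (Python negative indices allowed).
def Pre_get_wrong_letter_coords_in_room (burrow : List (List String)) (col : Int) (desired_letter : String) : Prop :=
  ∀ row ∈ PySem.List.pyRange 2 ((burrow.length : Int) - 1) 1,
    (((PySem.List.pyGet? burrow row).bind (fun r => PySem.List.pyGet? r col)).isSome = true)
instance (burrow : List (List String)) (col : Int) (desired_letter : String) : Decidable (Pre_get_wrong_letter_coords_in_room burrow col desired_letter) := by unfold Pre_get_wrong_letter_coords_in_room; infer_instance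

def pvWitness_get_wrong_letter_coords_in_room : List (List String) × Int × String :=
  ([["#"], ["#"], ["A"], ["B"], ["#"]], 0, "A")

def Spec_get_wrong_letter_coords_in_room (burrow : List (List String)) (col : Int) (desired_letter : String) (out : List ((Int × Int) × String)) : Prop := out = get_wrong_letter_coords_in_room_alt burrow col desired_letter
instance (burrow : List (List String)) (col : Int) (desired_letter : String) (out : List ((Int × Int) × String)) : Decidable (Spec_get_wrong_letter_coords_in_room burrow col desired_letter out) := by unfold Spec_get_wrong_letter_coords_in_room; infer_instance

-- ===== CLAIM (what is proved, stated in full; the proofs are below) =====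
def Claim_equal_get_wrong_letter_coords_in_room : Prop := ∀ (burrow : List (List String)) (col : Int) (desired_letter : String), Dom_get_wrong_letter_coords_in_room burrow col desired_letter → Pre_get_wrong_letter_coords_in_room burrow col desired_letter → Spec_get_wrong_letter_coords_in_room burrow col desired_letter (get_wrong_letter_coords_in_room burrow col desired_letter)

-- ===== LEMMAS AND PROOFS =====

-- A's loop body, named for the proofs (defeq to the lambda in the port).
def pvStep (letter : Int → String) (des : String) (col : Int)
    (st : List ((Int × Int) × String) × Bool) (row : Int) : List ((Int × Int) × String) × Bool :=
  if letter row != des || st.2 then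
    (if PySem.Str.isIn (letter row) "ABCD" then st.1 ++ [((row, col), letter row)] else st.1, true)
  else st

-- A's loop once the sticky flag is true: it appends every remaining 'ABCD' row.
theorem foldA_true (letter : Int → String) (des : String) (col : Int) (L : List Int)
    (acc : List ((Int × Int) × String)) :
    (L.foldl (pvStep letter des col) (acc, true)).1
    = acc ++ ((L.filter (fun r => PySem.Str.isIn (letter r) "ABCD")).map (fun r => ((r, col), letter r))) := by
  induction L generalizing acc with
  | nil => simp
  | cons h t ih =>
    have hstep : pvStep letter des col (acc, true) h
        = (if PySem.Str.isIn (letter h) "ABCD" then acc ++ [((h, col), letter h)] else acc, true) := by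
      simp [pvStep]
    rw [List.foldl_cons, hstep, ih, List.filter_cons]
    by_cases hab : PySem.Str.isIn (letter h) "ABCD" = true
    · rw [if_pos hab, if_pos hab]; simp
    · rw [if_neg hab, if_neg hab]

-- A's loop from the initial (flag = false) state: nothing happens while the letter is the desired one,
-- then everything below the first wrong row is collected.
theorem foldA_false (letter : Int → String) (des : String) (col : Int) (L : List Int)
    (acc : List ((Int × Int) × String)) :
    (L.foldl (pvStep letter des col) (acc, false)).1
    = acc ++ (((L.dropWhile (fun r => letter r == des)).filter (fun r => PySem.Str.isIn (letter r) "ABCD")).map (fun r => ((r, col), letter r))) := by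
  induction L generalizing acc with
  | nil => simp
  | cons h t ih =>
    by_cases hw : letter h == des
    · have hstep : pvStep letter des col (acc, false) h = (acc, false) := by
        simp [pvStep, bne, hw]
      rw [List.foldl_cons, hstep, ih]
      simp [hw]
    · have hstep : pvStep letter des col (acc, false) h
          = (if PySem.Str.isIn (letter h) "ABCD" then acc ++ [((h, col), letter h)] else acc, true) := by
        simp [pvStep, bne, hw]
      rw [List.foldl_cons, hstep, foldA_true]
      rw [List.dropWhile_cons_of_neg (by simpa using hw), List.filter_cons]
      by_cases hab : PySem.Str.isIn (letter h) "ABCD" = true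
      · rw [if_pos hab, if_pos hab]; simp
      · rw [if_neg hab, if_neg hab]

-- Python max over a list whose elements are all below c, extended by c at the end.
-- Python max over a list whose elements are all below c, extended by c at the end.
theorem max?_append_singleton_of_lt (ys : List Int) (c : Int) (h : ∀ y ∈ ys, y < c) :
    PySem.List.max? (ys ++ [c]) (fun x => x) = some c := by
  cases ys with
  | nil => rfl
  | cons y t =>
    rw [List.cons_append, PySem.List.max?_id_cons, List.foldl_append]
    have hlt : List.foldl max y t < c := by
      rcases PySem.List.foldl_max_mem t y with h1 | h1
      · rw [h1]; exact h y List.mem_cons_self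
      · exact h _ (List.mem_cons_of_mem _ h1)
    simp only [List.foldl_cons, List.foldl_nil]
    rw [max_eq_right (le_of_lt hlt)]

-- The boundary search: dropping the desired-letter prefix of the descending scan is the same as
-- scanning down from the deepest wrong row (threshold 1, i.e. empty scan, when no row is wrong).
theorem range_drop (letter : Int → String) (des : String) (b : Int) :
    ((PySem.List.pyRange 2 b 1).reverse).dropWhile (fun r => letter r == des)
    = (PySem.List.pyRange 2
        (PySem.List.maxD ((PySem.List.pyRange 2 b 1).filter (fun r => letter r != des)) (fun x => x) 1 + 1) 1).reverse := by
  by_cases hb : b ≤ 2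
  · rw [PySem.List.pyRange_one_eq_nil hb]
    simp [PySem.List.maxD, PySem.List.max?]
  · obtain ⟨k, hk⟩ : ∃ k : Nat, b = 2 + (k : Int) := ⟨(b - 2).toNat, by omega⟩
    subst hk
    clear hb
    induction k with
    | zero =>
      simp only [Nat.cast_zero, add_zero]
      rw [PySem.List.pyRange_one_eq_nil (by omega : (2:Int) ≤ 2)]
      simp [PySem.List.maxD, PySem.List.max?]
    | succ k ih =>
      have hc : (2 : Int) ≤ 2 + (k : Int) := by omega
      have hcast : (2 : Int) + ((k + 1 : Nat) : Int) = (2 + (k : Int)) + 1 := by push_cast; ring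
      rw [hcast]
      rw [PySem.List.pyRange_one_succ_right (a := 2) (b := 2 + (k : Int)) hc]
      by_cases hw : letter (2 + (k : Int)) == des
      · have hfilter : (PySem.List.pyRange 2 (2 + (k : Int)) 1 ++ [2 + (k : Int)]).filter (fun r => letter r != des)
            = (PySem.List.pyRange 2 (2 + (k : Int)) 1).filter (fun r => letter r != des) := by
          simp [List.filter_append, bne, hw]
        rw [hfilter]
        simp only [List.reverse_append, List.reverse_singleton, List.singleton_append]
        rw [List.dropWhile_cons_of_pos (by simpa using hw)]
        exact ih
      · have hfilter : (PySem.List.pyRange 2 (2 + (k : Int)) 1 ++ [2 + (k : Int)]).filter (fun r => letter r != des)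
            = ((PySem.List.pyRange 2 (2 + (k : Int)) 1).filter (fun r => letter r != des)) ++ [2 + (k : Int)] := by
          simp [List.filter_append, bne, hw]
        rw [hfilter]
        have hmax : PySem.List.maxD
            (((PySem.List.pyRange 2 (2 + (k : Int)) 1).filter (fun r => letter r != des)) ++ [2 + (k : Int)])
            (fun x => x) 1 = 2 + (k : Int) := by
          unfold PySem.List.maxD
          rw [max?_append_singleton_of_lt]
          · rfl
          · intro y hy
            have := (PySem.List.mem_pyRange_one.mp (List.mem_of_mem_filter hy)).2
            omega
        rw [hmax]
        rw [PySem.List.pyRange_one_succ_right (a := 2) (b := 2 + (k : Int)) hc]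
        simp only [List.reverse_append, List.reverse_singleton, List.singleton_append]
        rw [List.dropWhile_cons_of_neg (by simpa using hw)]

-- ===== VERDICT (by name: the statement is the Claim_ definition above) =====
theorem get_wrong_letter_coords_in_room_spec : Claim_equal_get_wrong_letter_coords_in_room := by
  intro burrow col desired_letter _ _
  show ((PySem.List.pyRange ((burrow.length : Int) - 2) 1 (-1)).foldl
      (pvStep (fun r => PySem.List.pyGetD (PySem.List.pyGetD burrow r []) col "") desired_letter col)
      ([], false)).1
    = ((PySem.List.pyRange (PySem.List.maxD ((PySem.List.pyRange 2 ((burrow.length : Int) - 1) 1).filter (fun row => PySem.List.pyGetD (PySem.List.pyGetD burrow row []) col "" != desired_letter)) (fun x => x) 1) 1 (-1)).filter (fun row => PySem.Str.isIn (PySem.List.pyGetD (PySem.List.pyGetD burrow row []) col "") "ABCD")).map (fun row => ((row, col), PySem.List.pyGetD (PySem.List.pyGetD burrow row []) col ""))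
  have h1 : PySem.List.pyRange ((burrow.length : Int) - 2) 1 (-1)
      = (PySem.List.pyRange 2 ((burrow.length : Int) - 1) 1).reverse := by
    have e2 : (burrow.length : Int) - 2 + 1 = (burrow.length : Int) - 1 := by ring
    rw [PySem.List.pyRange_neg_one_eq_reverse, e2]
    norm_num
  have h2 : ∀ m : Int, PySem.List.pyRange m 1 (-1) = (PySem.List.pyRange 2 (m + 1) 1).reverse := by
    intro m
    rw [PySem.List.pyRange_neg_one_eq_reverse]
    norm_num
  rw [h1, h2,
    foldA_false (fun r => PySem.List.pyGetD (PySem.List.pyGetD burrow r []) col "") desired_letter col,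
    range_drop (fun r => PySem.List.pyGetD (PySem.List.pyGetD burrow r []) col "") desired_letter]
  simp
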